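-- pv_equiv track=rewrite | github.com/tbold5/A01072453_1510_assignments | A5/q10.py | database_shared_headings
-- ===== SOURCE A (Python) =====
-- def database_shared_headings(db_dictionary: dict) -> set:
--     """Return set of keys.
--
--     A that takes dictionary of dictonaries and returns set of keys used in all of inner dictionaries.
--     PRECONDITION: dictionary keys has to be strings and its values must be a dictionary.
--     PARAM: db_dictionary, a dictionary.
--     RETURN: a set that contains all the keys used in inner dictionaries.
--     >>> database_shared_headings({'student1': {'name': 'Trae', 'student_number': 'A01072453'}, 'student2': {'name': 'Bob'}})
--     {'name'}
--     >>> database_shared_headings({'student1': {'name': 'Trae'}, 'student2': {'hobby': 'swimming'}})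
--     set()
--     """
--     # Create empty set for unique values.
--     all_info_set = set()
--
--     # Populate the set with every information.
--     for child_dictionary in db_dictionary.values():
--         for info in child_dictionary.keys():
--             if info not in all_info_set:
--                 all_info_set.add(info)
--
--     # Loop through the dictionary and update the set through intersection to values that exist on both sides.
--     for child_dictionary in db_dictionary.values():
--         all_info_set = all_info_set.intersection(child_dictionary.keys())
--     return all_info_set
-- ===== SOURCE B (Python) =====
-- def database_shared_headings(db_dictionary: dict) -> set:
--     """Single pass: intersect an accumulator with each inner dict's keys."""
--     common = None
--     for child_dictionary in db_dictionary.values():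
--         if common is None:
--             common = set(child_dictionary.keys())
--         else:
--             common &= child_dictionary.keys()
--     return common if common is not None else set()
-- ===== Notes on version B (the rewrite author's own statement) =====
-- stated objective: simpler
-- what changed: Replaced A's two passes (build the union of all inner keys, then intersect it with every inner dict) by one pass that seeds an accumulator with the first inner dict's keys and intersects it with each subsequent one.
import Mathlib
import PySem

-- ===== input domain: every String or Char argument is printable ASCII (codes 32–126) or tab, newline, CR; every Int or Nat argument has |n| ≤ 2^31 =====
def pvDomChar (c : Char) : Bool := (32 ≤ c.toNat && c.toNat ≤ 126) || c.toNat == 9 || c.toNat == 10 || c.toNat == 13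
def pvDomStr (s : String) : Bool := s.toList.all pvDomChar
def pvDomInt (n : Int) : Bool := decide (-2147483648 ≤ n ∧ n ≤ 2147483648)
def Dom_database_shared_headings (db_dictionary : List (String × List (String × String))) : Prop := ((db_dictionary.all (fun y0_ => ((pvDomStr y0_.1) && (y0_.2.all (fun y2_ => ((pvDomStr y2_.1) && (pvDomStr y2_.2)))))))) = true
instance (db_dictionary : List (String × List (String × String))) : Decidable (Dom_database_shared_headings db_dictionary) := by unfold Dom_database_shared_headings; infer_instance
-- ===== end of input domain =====

-- B replaces A's two passes (build the union of all inner keys, then intersect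
-- with every inner dict) by one pass intersecting an accumulator: simpler.

-- ===== PORT A =====
def database_shared_headings (db_dictionary : List (String × List (String × String))) : List String :=
  let vals := (PySem.Dict.ofList db_dictionary).values
  -- all_info_set = set(); for child in values: for info in child.keys(): if info not in set: add
  let all_info_set :=
    vals.foldl (fun s child =>
      ((PySem.Dict.ofList child).keys).foldl (fun s info =>
        if !(PySem.Set.contains s info) then PySem.Set.add s info else s) s)
      (PySem.Set.empty : PySem.Set String)
  -- for child in values: all_info_set = all_info_set.intersection(child.keys())
  vals.foldl (fun s child => PySem.Set.inter s ((PySem.Dict.ofList child).keys)) all_info_set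

-- ===== PORT B =====
def database_shared_headings_alt (db_dictionary : List (String × List (String × String))) : List String :=
  -- common = None; for child in values: common = set(child.keys()) if common is None else common & child.keys()
  let common :=
    ((PySem.Dict.ofList db_dictionary).values).foldl
      (fun (acc : Option (PySem.Set String)) child =>
        match acc with
        | none   => some (PySem.Set.ofList ((PySem.Dict.ofList child).keys))
        | some s => some (PySem.Set.inter s ((PySem.Dict.ofList child).keys)))
      none
  -- return common if common is not None else set()
  common.getD PySem.Set.empty

-- ===== PRECONDITION & SPEC =====
def Spec_database_shared_headings (db_dictionary : List (String × List (String × String))) (out : List String) : Prop := out = database_shared_headings_alt db_dictionary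
instance (db_dictionary : List (String × List (String × String))) (out : List String) : Decidable (Spec_database_shared_headings db_dictionary out) := by unfold Spec_database_shared_headings; infer_instance

-- ===== CLAIM (what is proved, stated in full; the proofs are below) =====
def Claim_equal_database_shared_headings : Prop := ∀ (db_dictionary : List (String × List (String × String))), Dom_database_shared_headings db_dictionary → Spec_database_shared_headings db_dictionary (database_shared_headings db_dictionary)

-- ===== LEMMAS AND PROOFS =====

-- A's guarded insertion is exactly Set.add.
theorem pv_guard_eq_add (s : PySem.Set String) (x : String) :
    (if !(PySem.Set.contains s x) then PySem.Set.add s x else s) = PySem.Set.add s x := by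
  unfold PySem.Set.add
  by_cases hm : x ∈ s
  · simp [PySem.Set.contains, hm]
  · simp [PySem.Set.contains, hm]

-- folding Set.add only appends fresh elements
theorem pv_foldl_add_pref (xs : List String) : ∀ (s : PySem.Set String),
    ∃ t, xs.foldl PySem.Set.add s = s ++ t ∧ ∀ x ∈ t, x ∉ s := by
  induction xs with
  | nil => intro s; exact ⟨[], by simp⟩
  | cons a xs ih =>
    intro s
    by_cases h : PySem.Set.contains s a = true
    · have hmem : a ∈ s := by simpa [PySem.Set.contains, List.contains_iff_mem] using h
      have hadd : PySem.Set.add s a = s := by simp [PySem.Set.add, hmem]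
      obtain ⟨t, ht, hfresh⟩ := ih s
      exact ⟨t, by simpa [hadd] using ht, hfresh⟩
    · have hmem : a ∉ s := by simpa [PySem.Set.contains, List.contains_iff_mem] using h
      have hadd : PySem.Set.add s a = s ++ [a] := by simp [PySem.Set.add, hmem]
      obtain ⟨t, ht, hfresh⟩ := ih (s ++ [a])
      refine ⟨a :: t, ?_, ?_⟩
      · simp only [List.foldl_cons, hadd, ht, List.append_assoc, List.singleton_append]
      · intro x hx
        rcases List.mem_cons.mp hx with hx | hx
        · subst hx
          exact hmem
        · intro hmem
          exact hfresh x hx (List.mem_append.mpr (Or.inl hmem))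

theorem pv_foldl_update_pref (ls : List (List String)) : ∀ (s : PySem.Set String),
    ∃ t, ls.foldl PySem.Set.update s = s ++ t ∧ ∀ x ∈ t, x ∉ s := by
  induction ls with
  | nil => intro s; exact ⟨[], by simp⟩
  | cons c ls ih =>
    intro s
    obtain ⟨t1, ht1, hf1⟩ := pv_foldl_add_pref c s
    have hu : PySem.Set.update s c = s ++ t1 := ht1
    obtain ⟨t2, ht2, hf2⟩ := ih (PySem.Set.update s c)
    refine ⟨t1 ++ t2, ?_, ?_⟩
    · show List.foldl PySem.Set.update (PySem.Set.update s c) ls = s ++ (t1 ++ t2)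
      rw [ht2, hu, List.append_assoc]
    · intro x hx
      rcases List.mem_append.mp hx with hx | hx
      · exact hf1 x hx
      · intro hmem
        exact hf2 x hx (by rw [hu]; exact List.mem_append.mpr (Or.inl hmem))

-- every element of set(ks) is in ks, so intersecting set(ks) with ks keeps it all
theorem pv_inter_ofList_self (ks : List String) :
    PySem.Set.inter (PySem.Set.ofList ks) ks = PySem.Set.ofList ks := by
  unfold PySem.Set.inter
  apply List.filter_eq_self.mpr
  intro x hx
  have hmem : x ∈ ks := (PySem.Set.mem_ofList ks x).mp hx
  simpa [PySem.Set.contains, List.contains_iff_mem] using hmem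

-- the option-fold of B computes the plain inter-fold once seeded
theorem pv_option_fold (rest : List (List (String × String))) :
    ∀ (s : PySem.Set String),
    rest.foldl (fun (acc : Option (PySem.Set String)) child =>
        match acc with
        | none   => some (PySem.Set.ofList ((PySem.Dict.ofList child).keys))
        | some s => some (PySem.Set.inter s ((PySem.Dict.ofList child).keys)))
      (some s)
    = some (rest.foldl (fun s child => PySem.Set.inter s ((PySem.Dict.ofList child).keys)) s) := by
  induction rest with
  | nil => intro s; rfl
  | cons c rest ih => intro s; simpa using ih _

-- the core equivalence, over an arbitrary list of inner dicts
theorem pv_core (vals : List (List (String × String))) :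
    vals.foldl (fun s child => PySem.Set.inter s ((PySem.Dict.ofList child).keys))
      (vals.foldl (fun s child =>
        ((PySem.Dict.ofList child).keys).foldl (fun s info =>
          if !(PySem.Set.contains s info) then PySem.Set.add s info else s) s)
        (PySem.Set.empty : PySem.Set String))
    = (vals.foldl (fun (acc : Option (PySem.Set String)) child =>
        match acc with
        | none   => some (PySem.Set.ofList ((PySem.Dict.ofList child).keys))
        | some s => some (PySem.Set.inter s ((PySem.Dict.ofList child).keys)))
        none).getD PySem.Set.empty := by
  -- the inner guarded loop is Set.update
  have hupd : (fun (s : PySem.Set String) (child : List (String × String)) =>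
      ((PySem.Dict.ofList child).keys).foldl (fun s info =>
        if !(PySem.Set.contains s info) then PySem.Set.add s info else s) s)
      = fun s child => PySem.Set.update s ((PySem.Dict.ofList child).keys) := by
    funext s child
    unfold PySem.Set.update
    congr 1
    funext s x
    exact pv_guard_eq_add s x
  rw [hupd]
  cases vals with
  | nil => rfl
  | cons c rest =>
    have h0 : PySem.Set.update (PySem.Set.empty : PySem.Set String) ((PySem.Dict.ofList c).keys)
        = PySem.Set.ofList ((PySem.Dict.ofList c).keys) := rfl
    obtain ⟨t, ht, hfresh⟩ := pv_foldl_update_pref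
      (rest.map (fun child => (PySem.Dict.ofList child).keys))
      (PySem.Set.ofList ((PySem.Dict.ofList c).keys))
    have hbuild : rest.foldl (fun s child => PySem.Set.update s ((PySem.Dict.ofList child).keys))
        (PySem.Set.ofList ((PySem.Dict.ofList c).keys))
        = PySem.Set.ofList ((PySem.Dict.ofList c).keys) ++ t := by
      rw [← ht, ← List.foldl_map (f := fun child => (PySem.Dict.ofList child).keys)]
    -- first intersection step collapses the union back to set of first child's keys
    have hinter : PySem.Set.inter (PySem.Set.ofList ((PySem.Dict.ofList c).keys) ++ t)
        ((PySem.Dict.ofList c).keys) = PySem.Set.ofList ((PySem.Dict.ofList c).keys) := by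
      unfold PySem.Set.inter
      rw [List.filter_append]
      have h1 := pv_inter_ofList_self ((PySem.Dict.ofList c).keys)
      unfold PySem.Set.inter at h1
      have h2 : List.filter (fun x => PySem.Set.contains ((PySem.Dict.ofList c).keys) x) t = [] := by
        apply List.filter_eq_nil_iff.mpr
        intro x hx
        have hni : x ∉ PySem.Set.ofList ((PySem.Dict.ofList c).keys) := hfresh x hx
        have hnk : x ∉ (PySem.Dict.ofList c).keys :=
          fun hm => hni ((PySem.Set.mem_ofList _ _).mpr hm)
        simpa [PySem.Set.contains, List.contains_iff_mem] using hnk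
      rw [h1, h2, List.append_nil]
    simp only [List.foldl_cons]
    rw [h0, hbuild, hinter, pv_option_fold, Option.getD_some]

-- ===== VERDICT (by name: the statement is the Claim_ definition above) =====
theorem database_shared_headings_spec : Claim_equal_database_shared_headings := by
  intro db _
  unfold Spec_database_shared_headings database_shared_headings database_shared_headings_alt
  exact pv_core ((PySem.Dict.ofList db).values)
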